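-- pv_equiv track=rewrite | github.com/XGallardoX/Complejidad-CYK | CYK-Python/CYK.py | run_cyk_for_lengths
-- ===== SOURCE A (Python) =====
-- R = {
--     "NP": [["Det", "Nom"]],
--     "Nom": [["AP", "Nom"], ["book"], ["orange"], ["man"]],
--     "AP": [["Adv", "A"], ["heavy"], ["orange"], ["tall"]],
--     "Det": [["a"]],
--     "Adv": [["very"], ["extremely"]],
--     "A": [["heavy"], ["orange"], ["tall"], ["muscular"]]
-- }
--
-- def cykParse(w):
--     n = len(w)
--
--     # Operation counters
--     init_ops = 0
--     terminal_ops = 0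
--     table_ops = 0
--
--     # 1. Initialize the table
--     T = [[set() for _ in range(n)] for _ in range(n)]
--     init_ops = n**2  # O(n^2) for initializing the table
--
--     # 2. Filling in the diagonal with terminal matches
--     for j in range(n):
--         for lhs, rule in R.items():
--             for rhs in rule:
--                 if len(rhs) == 1 and rhs[0] == w[j]:
--                     T[j][j].add(lhs)
--                     terminal_ops += 1  # Counting an operation
--
--     # 3. Filling in the rest of the table
--     for length in range(2, n + 1):  # length of the span
--         for i in range(n - length + 1):
--             j = i + length - 1
--             for k in range(i, j):
--                 # Iterate over the rules
--                 for lhs, rule in R.items():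
--                     for rhs in rule:
--                         if len(rhs) == 2 and rhs[0] in T[i][k] and rhs[1] in T[k + 1][j]:
--                             T[i][j].add(lhs)
--                             table_ops += 1  # Increment operation count for each successful addition
--
--     return init_ops, terminal_ops, table_ops
--
-- def run_cyk_for_lengths(max_len):
--     init_ops_list = []
--     terminal_ops_list = []
--     total_ops_list = []
--
--     for n in range(1, max_len + 1):
--         # Create an input string of length n (using the word 'book' n times for simplicity)
--         w = ["book"] * n
--         init_ops, terminal_ops, table_ops = cykParse(w)
--         total_ops = init_ops * terminal_ops
--
--         # Append the operation counts
--         init_ops_list.append(init_ops)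
--         terminal_ops_list.append(terminal_ops)
--         #table_ops_list.append(table_ops)
--         total_ops_list.append(total_ops)
--
--     return init_ops_list, terminal_ops_list, total_ops_list
-- ===== SOURCE B (Python) =====
-- def run_cyk_for_lengths(max_len):
--     # Closed form: for w = ["book"]*n the CYK counters are init=n^2, terminal=n, total=n^3.
--     ns = list(range(1, max_len + 1))
--     return [n * n for n in ns], list(ns), [n ** 3 for n in ns]
-- ===== Notes on version B (the rewrite author's own statement) =====
-- stated objective: faster
-- what changed: Replaces running the full CYK parser on ['book']*n for every n with the closed forms init=n^2, terminal=n, total=n^3 produced by three comprehensions over range(1, max_len+1).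
import Mathlib
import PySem

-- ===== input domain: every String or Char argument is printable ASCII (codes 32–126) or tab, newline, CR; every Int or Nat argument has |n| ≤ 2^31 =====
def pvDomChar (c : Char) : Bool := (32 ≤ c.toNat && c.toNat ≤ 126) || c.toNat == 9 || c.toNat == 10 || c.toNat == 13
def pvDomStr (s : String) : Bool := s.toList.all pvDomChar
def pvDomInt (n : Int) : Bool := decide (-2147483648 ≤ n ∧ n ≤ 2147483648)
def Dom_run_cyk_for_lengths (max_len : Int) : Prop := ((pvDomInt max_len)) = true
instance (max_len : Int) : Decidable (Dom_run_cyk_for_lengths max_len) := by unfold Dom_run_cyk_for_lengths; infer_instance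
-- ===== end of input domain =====

-- B replaces running the CYK parser on ["book"]*n for each n by the closed forms
-- n^2 / n / n^3 over the range — faster in a timing run (asymptotic change).


-- ===== PORT A =====

-- the module-level grammar R (dict in insertion order)
def cykR : List (String × List (List String)) :=
  [("NP",  [["Det","Nom"]]),
   ("Nom", [["AP","Nom"],["book"],["orange"],["man"]]),
   ("AP",  [["Adv","A"],["heavy"],["orange"],["tall"]]),
   ("Det", [["a"]]),
   ("Adv", [["very"],["extremely"]]),
   ("A",   [["heavy"],["orange"],["tall"],["muscular"]])]

-- T[i][j]: all indices produced by the loops are in range, so getD/setD are exact here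
def cykGetCell (T : List (List (PySem.Set String))) (i j : Int) : PySem.Set String :=
  PySem.List.pyGetD (PySem.List.pyGetD T i []) j PySem.Set.empty

def cykSetCell (T : List (List (PySem.Set String))) (i j : Int)
    (v : PySem.Set String) : List (List (PySem.Set String)) :=
  PySem.List.pySetD T i (PySem.List.pySetD (PySem.List.pyGetD T i []) j v)

-- one iteration of the diagonal-filling loop (the inner scan of R for a fixed j)
def cykTermStep (w : List String) (st : List (List (PySem.Set String)) × Int) (j : Int) :
    List (List (PySem.Set String)) × Int :=
  cykR.foldl (fun st lr =>
    lr.2.foldl (fun st rhs =>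
      if rhs.length == 1 && (PySem.List.pyGetD rhs 0 "" == PySem.List.pyGetD w j "")
      then (cykSetCell st.1 j j (PySem.Set.add (cykGetCell st.1 j j) lr.1), st.2 + 1)
      else st) st) st

-- the scan of R inside the innermost table loop (fixed i, j, k)
def cykTableInner (st : List (List (PySem.Set String)) × Int) (i j k : Int) :
    List (List (PySem.Set String)) × Int :=
  cykR.foldl (fun st lr =>
    lr.2.foldl (fun st rhs =>
      if rhs.length == 2
         && PySem.Set.contains (cykGetCell st.1 i k) (PySem.List.pyGetD rhs 0 "")
         && PySem.Set.contains (cykGetCell st.1 (k+1) j) (PySem.List.pyGetD rhs 1 "")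
      then (cykSetCell st.1 i j (PySem.Set.add (cykGetCell st.1 i j) lr.1), st.2 + 1)
      else st) st) st

def cykParse (w : List String) : Int × Int × Int :=
  let n : Int := (w.length : Int)
  let T : List (List (PySem.Set String)) :=
    List.replicate w.length (List.replicate w.length PySem.Set.empty)
  let init_ops : Int := n ^ 2
  let s1 := (PySem.List.pyRange 0 n 1).foldl (cykTermStep w) (T, 0)
  let terminal_ops := s1.2
  let s2 := (PySem.List.pyRange 2 (n+1) 1).foldl (fun st length =>
      (PySem.List.pyRange 0 (n - length + 1) 1).foldl (fun st i =>
        let j := i + length - 1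
        (PySem.List.pyRange i j 1).foldl (fun st k => cykTableInner st i j k) st) st)
    (s1.1, 0)
  (init_ops, terminal_ops, s2.2)

def run_cyk_for_lengths (max_len : Int) : List (List Int) :=
  let fin := (PySem.List.pyRange 1 (max_len+1) 1).foldl (fun acc n =>
    let w := List.replicate n.toNat "book"   -- ["book"] * n, n ≥ 1 here
    let r := cykParse w
    let total_ops := r.1 * r.2.1
    (acc.1 ++ [r.1], acc.2.1 ++ [r.2.1], acc.2.2 ++ [total_ops]))
    (([] : List Int), ([] : List Int), ([] : List Int))
  [fin.1, fin.2.1, fin.2.2]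

-- ===== PORT B =====
def run_cyk_for_lengths_alt (max_len : Int) : List (List Int) :=
  let ns := PySem.List.pyRange 1 (max_len+1) 1
  [ns.map (fun n => n * n), ns, ns.map (fun n => n ^ 3)]

-- ===== PRECONDITION & SPEC =====
def Spec_run_cyk_for_lengths (max_len : Int) (out : List (List Int)) : Prop := out = run_cyk_for_lengths_alt max_len
instance (max_len : Int) (out : List (List Int)) : Decidable (Spec_run_cyk_for_lengths max_len out) := by unfold Spec_run_cyk_for_lengths; infer_instance

-- ===== CLAIM (what is proved, stated in full; the proofs are below) =====
def Claim_equal_run_cyk_for_lengths : Prop := ∀ (max_len : Int), Dom_run_cyk_for_lengths max_len → Spec_run_cyk_for_lengths max_len (run_cyk_for_lengths max_len)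

-- ===== LEMMAS AND PROOFS =====

-- on w whose j-th word is "book", one diagonal step adds exactly one to the counter
theorem cykTermStep_snd (w : List String) (T : List (List (PySem.Set String))) (c j : Int)
    (hj : PySem.List.pyGetD w j "" = "book") :
    (cykTermStep w (T, c) j).2 = c + 1 := by
  simp [cykTermStep, cykR, List.foldl, hj]

theorem cykTermFold_snd (w : List String) :
    ∀ (l : List Int) (T : List (List (PySem.Set String))) (c : Int),
      (∀ j ∈ l, PySem.List.pyGetD w j "" = "book") →
      ((l.foldl (cykTermStep w) (T, c)).2 = c + l.length) := by
  intro l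
  induction l with
  | nil => intro T c _; simp
  | cons j l ih =>
    intro T c h
    have hj := h j (List.mem_cons_self ..)
    have hstep : cykTermStep w (T, c) j =
        ((cykTermStep w (T, c) j).1, (cykTermStep w (T, c) j).2) := rfl
    calc ((j :: l).foldl (cykTermStep w) (T, c)).2
        = ((l.foldl (cykTermStep w)
            ((cykTermStep w (T, c) j).1, (cykTermStep w (T, c) j).2))).2 := by
          simp [List.foldl]
      _ = (cykTermStep w (T, c) j).2 + l.length := by
          exact ih _ _ (fun x hx => h x (List.mem_cons_of_mem _ hx))
      _ = c + 1 + l.length := by rw [cykTermStep_snd w T c j hj]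
      _ = c + (j :: l).length := by simp; ring

theorem cykParse_book (m : Nat) :
    (cykParse (List.replicate m "book")).1 = (m : Int) ^ 2 ∧
    (cykParse (List.replicate m "book")).2.1 = (m : Int) := by
  constructor
  · simp [cykParse]
  · simp only [cykParse, List.length_replicate]
    rw [cykTermFold_snd]
    · simp [PySem.List.length_pyRange_one]
    · intro j hj
      rw [PySem.List.mem_pyRange_one] at hj
      have h1 : j.toNat < m := by omega
      simp [PySem.List.pyGetD, PySem.List.pyGet?, PySem.List.pyIdx?, hj.1, hj.2, h1]

theorem runFold (l : List Int) :
    ∀ (a b c : List Int), (∀ x ∈ l, 0 ≤ x) →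
      (l.foldl (fun acc n =>
        let w := List.replicate n.toNat "book"
        let r := cykParse w
        let total_ops := r.1 * r.2.1
        (acc.1 ++ [r.1], acc.2.1 ++ [r.2.1], acc.2.2 ++ [total_ops])) (a, b, c))
      = (a ++ l.map (fun n => n * n), b ++ l, c ++ l.map (fun n => n ^ 3)) := by
  induction l with
  | nil => intro a b c _; simp
  | cons n l ih =>
    intro a b c h
    have hn : (0:Int) ≤ n := h n (List.mem_cons_self ..)
    have hc : ((n.toNat : Nat) : Int) = n := Int.toNat_of_nonneg hn
    have h1 := (cykParse_book n.toNat).1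
    have h2 := (cykParse_book n.toNat).2
    rw [hc] at h1 h2
    simp only [List.foldl_cons]
    rw [ih _ _ _ (fun x hx => h x (List.mem_cons_of_mem _ hx))]
    simp only [h1, h2, List.map_cons]
    have e1 : (n:Int) ^ 2 = n * n := by ring
    have e3 : (n:Int) * n * n = n ^ 3 := by ring
    rw [e1, e3]
    simp

-- ===== VERDICT (by name: the statement is the Claim_ definition above) =====
theorem run_cyk_for_lengths_spec : Claim_equal_run_cyk_for_lengths := by
  intro max_len _
  show run_cyk_for_lengths max_len = run_cyk_for_lengths_alt max_len
  unfold run_cyk_for_lengths run_cyk_for_lengths_alt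
  rw [runFold]
  · simp
  · intro x hx
    rw [PySem.List.mem_pyRange_one] at hx
    omega
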